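-- pv_equiv track=rewrite | github.com/MrBrantCode/unitest_baseline | mut_generate/mist_train_taco/taco_2046/solution.py | sort_and_check_stability
-- ===== SOURCE A (Python) =====
-- def sort_and_check_stability(cards, n):
--     def partition(A, p, r):
--         x = A[r][1]
--         i = p - 1
--         for j in range(p, r):
--             if A[j][1] <= x:
--                 i += 1
--                 (A[i], A[j]) = (A[j], A[i])
--         (A[i + 1], A[r]) = (A[r], A[i + 1])
--         return i + 1
--
--     def quick_sort(A, p, r):
--         if p < r:
--             q = partition(A, p, r)
--             quick_sort(A, p, q - 1)
--             quick_sort(A, q + 1, r)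
--
--     # Create a dictionary to store the original indices of the cards
--     ind = dict(((e, i) for (i, e) in enumerate(cards)))
--
--     # Perform the quick sort
--     quick_sort(cards, 0, n - 1)
--
--     # Check for stability
--     for i in range(n - 1):
--         if cards[i][1] == cards[i + 1][1]:
--             if ind[cards[i]] > ind[cards[i + 1]]:
--                 return 'Not stable', cards
--     return 'Stable', cards
-- ===== SOURCE B (Python) =====
-- def _partition(A, p, r):
--     x = A[r][1]
--     i = p - 1
--     for j in range(p, r):
--         if A[j][1] <= x:
--             i += 1
--             (A[i], A[j]) = (A[j], A[i])
--     (A[i + 1], A[r]) = (A[r], A[i + 1])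
--     return i + 1
--
--
-- def sort_and_check_stability(cards, n):
--     # original index of each card (last occurrence wins, as dict() does)
--     ind = {e: i for i, e in enumerate(cards)}
--
--     # iterative quicksort: explicit stack of (p, r) ranges instead of recursion;
--     # pushing the right sub-range first keeps the pop order equal to A's call order
--     stack = [(0, n - 1)]
--     while stack:
--         p, r = stack.pop()
--         if p < r:
--             q = _partition(cards, p, r)
--             stack.append((q + 1, r))
--             stack.append((p, q - 1))
--
--     bad = any(cards[i][1] == cards[i + 1][1] and ind[cards[i]] > ind[cards[i + 1]]
--               for i in range(n - 1))
--     return ('Not stable', cards) if bad else ('Stable', cards)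
-- ===== Notes on version B (the rewrite author's own statement) =====
-- stated objective: alternative
-- what changed: A's recursive quick_sort is replaced by an iterative driver over an explicit stack of (p,r) ranges (right sub-range pushed first, so partitions run in the same order), and the index-based stability loop with early return becomes a single any() over adjacent pairs; the partition step is the same, so the exact (possibly unstable) permutation is preserved.
import Mathlib
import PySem

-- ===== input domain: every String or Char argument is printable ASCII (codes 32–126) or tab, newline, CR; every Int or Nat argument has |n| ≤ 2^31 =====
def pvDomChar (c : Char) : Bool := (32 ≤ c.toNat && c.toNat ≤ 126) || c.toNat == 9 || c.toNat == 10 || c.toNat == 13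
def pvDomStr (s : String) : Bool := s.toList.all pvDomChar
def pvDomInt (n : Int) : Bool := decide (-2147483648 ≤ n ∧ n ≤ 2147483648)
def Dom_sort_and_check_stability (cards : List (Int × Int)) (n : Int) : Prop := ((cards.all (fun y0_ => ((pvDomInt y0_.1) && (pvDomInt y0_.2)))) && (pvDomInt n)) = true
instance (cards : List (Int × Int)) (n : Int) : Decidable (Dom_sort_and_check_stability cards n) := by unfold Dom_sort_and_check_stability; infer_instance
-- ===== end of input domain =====

-- B replaces A's recursive quicksort by an explicit-stack iterative driver (right sub-range
-- pushed first, so the partitions run in A's order) and the index stability loop with early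
-- return by a single any() over the adjacent pairs; the partition step is the same, so the
-- exact (possibly unstable) permutation matches.  Both A and B sort the passed list in place
-- in Python; the equivalence proved here is about the returned value (which contains that list).

-- ===== PORT A =====
-- A[i] (total form; exact wherever Python A runs without IndexError, i.e. under Pre_)
def pvGet (A : List (Int × Int)) (i : Int) : Int × Int := PySem.List.pyGetD A i (0, 0)
-- (A[i], A[j]) = (A[j], A[i])
def pvSwap (A : List (Int × Int)) (i j : Int) : List (Int × Int) :=
  PySem.List.pySetD (PySem.List.pySetD A i (pvGet A j)) j (pvGet A i)

-- the `for j in range(p, r)` loop of A's partition, as a foldl over the range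
def partStepA (x : Int) (s : Int × List (Int × Int)) (j : Int) : Int × List (Int × Int) :=
  if (pvGet s.2 j).2 ≤ x then (s.1 + 1, pvSwap s.2 (s.1 + 1) j) else s

def partitionA (A : List (Int × Int)) (p r : Int) : Int × List (Int × Int) :=
  let x := (pvGet A r).2
  let s := (PySem.List.pyRange p r 1).foldl (partStepA x) (p - 1, A)
  (s.1 + 1, pvSwap s.2 (s.1 + 1) r)

-- A's quick_sort recursion; the Nat fuel is only a totality guard (each call strictly
-- decreases (r-p).toNat, so the fuel quick_sortA supplies never runs out — qsGoA_irrel below)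
def qsGoA : Nat → List (Int × Int) → Int → Int → List (Int × Int)
  | 0, A, _, _ => A
  | f + 1, A, p, r =>
    if p < r then
      let pr := partitionA A p r
      qsGoA f (qsGoA f pr.2 p (pr.1 - 1)) (pr.1 + 1) r
    else A

def quick_sortA (A : List (Int × Int)) (p r : Int) : List (Int × Int) :=
  qsGoA ((r - p).toNat + 1) A p r

-- dict(((e, i) for (i, e) in enumerate(cards)))
def indexDictA (cards : List (Int × Int)) : PySem.Dict (Int × Int) Int :=
  (PySem.List.enumerate cards 0).foldl (fun d q => d.insert q.2 q.1) PySem.Dict.empty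

-- the stability for-loop with its early return
def scanA (ind : PySem.Dict (Int × Int) Int) (A : List (Int × Int)) : List Int → Bool
  | [] => false
  | i :: rest =>
    if (pvGet A i).2 == (pvGet A (i + 1)).2 then
      if ind.getD (pvGet A i) 0 > ind.getD (pvGet A (i + 1)) 0 then true
      else scanA ind A rest
    else scanA ind A rest

def sort_and_check_stability (cards : List (Int × Int)) (n : Int) : String × (List (Int × Int)) :=
  let ind := indexDictA cards
  let sorted := quick_sortA cards 0 (n - 1)
  if scanA ind sorted (PySem.List.pyRange 0 (n - 1) 1) then ("Not stable", sorted)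
  else ("Stable", sorted)

-- ===== PORT B =====
-- B's _partition: same algorithm, loop written as structural recursion over the j-range
def partGoB (x : Int) (i : Int) (A : List (Int × Int)) : List Int → Int × List (Int × Int)
  | [] => (i, A)
  | j :: js =>
    if (pvGet A j).2 ≤ x then partGoB x (i + 1) (pvSwap A (i + 1) j) js
    else partGoB x i A js

def partitionB (A : List (Int × Int)) (p r : Int) : Int × List (Int × Int) :=
  let s := partGoB (pvGet A r).2 (p - 1) A (PySem.List.pyRange p r 1)
  (s.1 + 1, pvSwap s.2 (s.1 + 1) r)

-- weight of a stack of ranges (fuel bound for the while loop; a totality guard only)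
def stackW (st : List (Int × Int)) : Nat :=
  (st.map (fun z => 2 * (z.2 - z.1 + 1).toNat)).sum + st.length

-- the while-loop over the explicit stack of (p, r) ranges
def qsLoopGoB : Nat → List (Int × Int) → List (Int × Int) → List (Int × Int)
  | 0, A, _ => A
  | _ + 1, A, [] => A
  | f + 1, A, (p, r) :: rest =>
    if p < r then
      let pr := partitionB A p r
      qsLoopGoB f pr.2 ((p, pr.1 - 1) :: (pr.1 + 1, r) :: rest)
    else qsLoopGoB f A rest

def qsLoopB (A : List (Int × Int)) (st : List (Int × Int)) : List (Int × Int) :=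
  qsLoopGoB (stackW st + 1) A st

-- {e: i for i, e in enumerate(cards)}
def indexDictB (cards : List (Int × Int)) : PySem.Dict (Int × Int) Int :=
  PySem.Dict.ofList ((PySem.List.enumerate cards 0).map (fun q => (q.2, q.1)))

def sort_and_check_stability_alt (cards : List (Int × Int)) (n : Int) : String × (List (Int × Int)) :=
  let ind := indexDictB cards
  let sorted := qsLoopB cards [(0, n - 1)]
  let bad := (PySem.List.pyRange 0 (n - 1) 1).any (fun i =>
    ((pvGet sorted i).2 == (pvGet sorted (i + 1)).2) &&
      decide (ind.getD (pvGet sorted i) 0 > ind.getD (pvGet sorted (i + 1)) 0))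
  if bad then ("Not stable", sorted) else ("Stable", sorted)

-- ===== PRECONDITION & SPEC =====
-- Pre_ excludes exactly the inputs where Python A raises IndexError: n beyond the list length
-- (unless n ≤ 1, where the sort and the scan are vacuous and A returns normally).
def Pre_sort_and_check_stability (cards : List (Int × Int)) (n : Int) : Prop :=
  n ≤ (cards.length : Int) ∨ n ≤ 1
instance (cards : List (Int × Int)) (n : Int) : Decidable (Pre_sort_and_check_stability cards n) := by
  unfold Pre_sort_and_check_stability; infer_instance

def pvWitness_sort_and_check_stability : (List (Int × Int)) × Int := ([(3, 1), (1, 1), (2, 0)], 3)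

def Spec_sort_and_check_stability (cards : List (Int × Int)) (n : Int) (out : String × (List (Int × Int))) : Prop := out = sort_and_check_stability_alt cards n
instance (cards : List (Int × Int)) (n : Int) (out : String × (List (Int × Int))) : Decidable (Spec_sort_and_check_stability cards n out) := by unfold Spec_sort_and_check_stability; infer_instance

-- ===== CLAIM (what is proved, stated in full; the proofs are below) =====
def Claim_equal_sort_and_check_stability : Prop := ∀ (cards : List (Int × Int)) (n : Int), Dom_sort_and_check_stability cards n → Pre_sort_and_check_stability cards n → Spec_sort_and_check_stability cards n (sort_and_check_stability cards n)

-- ===== LEMMAS AND PROOFS =====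

-- i never decreases and gains at most 1 per loop iteration
theorem partStepA_foldl_bounds (x : Int) (l : List Int) (s : Int × List (Int × Int)) :
    s.1 ≤ (l.foldl (partStepA x) s).1 ∧ (l.foldl (partStepA x) s).1 ≤ s.1 + l.length := by
  induction l generalizing s with
  | nil => simp
  | cons j js ih =>
    simp only [List.foldl_cons, List.length_cons]
    rcases ih (partStepA x s j) with ⟨h1, h2⟩
    unfold partStepA at *
    split_ifs at * <;> simp at * <;> omega

theorem partitionA_fst_bounds (A : List (Int × Int)) (p r : Int) (h : p < r) :
    p ≤ (partitionA A p r).1 ∧ (partitionA A p r).1 ≤ r := by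
  unfold partitionA
  have hb := partStepA_foldl_bounds (pvGet A r).2 (PySem.List.pyRange p r 1) (p - 1, A)
  have hl : (PySem.List.pyRange p r 1).length = (r - p).toNat := PySem.List.length_pyRange_one p r
  simp only [hl] at hb
  simp only []
  omega

-- any fuel beyond the range size gives the same result
theorem qsGoA_irrel (f : Nat) : ∀ (g : Nat) (A : List (Int × Int)) (p r : Int),
    (r - p).toNat < f → (r - p).toNat < g → qsGoA f A p r = qsGoA g A p r := by
  induction f with
  | zero => intro g A p r hf; omega
  | succ f ih =>
    intro g A p r hf hg
    match g with
    | 0 => omega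
    | g + 1 =>
      simp only [qsGoA]
      by_cases hpr : p < r
      · simp only [hpr, if_pos]
        have hb := partitionA_fst_bounds A p r hpr
        rw [ih f (partitionA A p r).2 p ((partitionA A p r).1 - 1) (by omega) (by omega),
            ih g (qsGoA f (partitionA A p r).2 p ((partitionA A p r).1 - 1))
              ((partitionA A p r).1 + 1) r (by omega) (by omega),
            ih g (partitionA A p r).2 p ((partitionA A p r).1 - 1) (by omega) (by omega)]
      · simp [hpr]

-- the unfolding equation of Python A's quick_sort
theorem quick_sortA_eq (A : List (Int × Int)) (p r : Int) :
    quick_sortA A p r =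
      if p < r then
        quick_sortA (quick_sortA (partitionA A p r).2 p ((partitionA A p r).1 - 1))
          ((partitionA A p r).1 + 1) r
      else A := by
  unfold quick_sortA
  rw [qsGoA]
  by_cases hpr : p < r
  · simp only [hpr, if_pos]
    have hb := partitionA_fst_bounds A p r hpr
    rw [qsGoA_irrel ((r - p).toNat) (((partitionA A p r).1 - 1 - p).toNat + 1)
          (partitionA A p r).2 p ((partitionA A p r).1 - 1) (by omega) (by omega),
        qsGoA_irrel ((r - p).toNat) ((r - ((partitionA A p r).1 + 1)).toNat + 1) _
          ((partitionA A p r).1 + 1) r (by omega) (by omega)]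
  · simp [hpr]

-- B's partition recursion computes A's partition fold
theorem partGoB_eq_foldl (x : Int) (l : List Int) (i : Int) (A : List (Int × Int)) :
    partGoB x i A l = l.foldl (partStepA x) (i, A) := by
  induction l generalizing i A with
  | nil => simp [partGoB]
  | cons j js ih =>
    simp only [partGoB, List.foldl_cons, partStepA]
    split_ifs <;> simp [ih]

theorem partitionB_eq (A : List (Int × Int)) (p r : Int) :
    partitionB A p r = partitionA A p r := by
  unfold partitionB partitionA
  rw [partGoB_eq_foldl]

-- the stack loop with enough fuel runs quick_sortA on each stacked range in order
theorem qsLoopGoB_run (f : Nat) : ∀ (A : List (Int × Int)) (st : List (Int × Int)),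
    stackW st < f →
    qsLoopGoB f A st = st.foldl (fun B z => quick_sortA B z.1 z.2) A := by
  induction f with
  | zero => intro A st h; omega
  | succ f ih =>
    intro A st hf
    match st with
    | [] => rw [qsLoopGoB]; rfl
    | (p, r) :: rest =>
      rw [qsLoopGoB]
      simp only [List.foldl_cons]
      by_cases hpr : p < r
      · simp only [hpr, if_pos, partitionB_eq]
        have hb := partitionA_fst_bounds A p r hpr
        have hw : stackW ((p, (partitionA A p r).1 - 1) ::
            ((partitionA A p r).1 + 1, r) :: rest) < f := by
          unfold stackW at *
          simp only [List.map_cons, List.sum_cons, List.length_cons] at *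
          omega
        rw [ih _ _ hw]
        simp only [List.foldl_cons]
        rw [quick_sortA_eq A p r]
        simp [hpr]
      · simp only [hpr, if_neg, not_false_iff]
        have hw : stackW rest < f := by
          unfold stackW at *
          simp only [List.map_cons, List.sum_cons, List.length_cons] at *
          omega
        rw [ih _ _ hw, quick_sortA_eq A p r]
        simp [hpr]

theorem qsLoopB_eq (A : List (Int × Int)) (p r : Int) :
    qsLoopB A [(p, r)] = quick_sortA A p r := by
  unfold qsLoopB
  rw [qsLoopGoB_run (stackW [(p, r)] + 1) A [(p, r)] (by omega)]
  rfl

-- the two index dicts coincide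
theorem indexDict_eq (cards : List (Int × Int)) : indexDictB cards = indexDictA cards := by
  unfold indexDictB indexDictA PySem.Dict.ofList PySem.Dict.update
  rw [List.foldl_map]

-- the early-return scan is an any over the range
theorem scanA_eq_any (ind : PySem.Dict (Int × Int) Int) (A : List (Int × Int)) (l : List Int) :
    scanA ind A l =
      l.any (fun i => ((pvGet A i).2 == (pvGet A (i + 1)).2) &&
        decide (ind.getD (pvGet A i) 0 > ind.getD (pvGet A (i + 1)) 0)) := by
  induction l with
  | nil => simp [scanA]
  | cons i rest ih =>
    simp only [scanA, List.any_cons]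
    split_ifs <;> simp_all

-- ===== VERDICT (by name: the statement is the Claim_ definition above) =====
theorem sort_and_check_stability_spec : Claim_equal_sort_and_check_stability := by
  intro cards n _ _
  unfold Spec_sort_and_check_stability
  simp only [sort_and_check_stability, sort_and_check_stability_alt, qsLoopB_eq, indexDict_eq,
    scanA_eq_any]
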